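-- pv_equiv track=rewrite | github.com/Nomoos/BlueMarble.Design | scripts/autosources-discovery.py | _infer_priority
-- ===== SOURCE A (Python) =====
-- def _infer_priority(text: str) -> str:
--     """Infer priority from description text"""
--     text_lower = text.lower()
--
--     if any(word in text_lower for word in ['critical', 'essential', 'must-read', 'fundamental']):
--         return 'critical'
--     elif any(word in text_lower for word in ['important', 'high', 'recommended']):
--         return 'high'
--     elif any(word in text_lower for word in ['useful', 'helpful', 'medium']):
--         return 'medium'
--     else:
--         return 'low'
-- ===== SOURCE B (Python) =====
-- _KEYWORD_RANK = {
--     'critical': 0, 'essential': 0, 'must-read': 0, 'fundamental': 0,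
--     'important': 1, 'high': 1, 'recommended': 1,
--     'useful': 2, 'helpful': 2, 'medium': 2,
-- }
-- _LABELS = ['critical', 'high', 'medium', 'low']
--
-- def _infer_priority(text: str) -> str:
--     """Infer priority by a single positional scan: at each index keep the best
--     (lowest) rank of any keyword starting there; return the label of the best rank."""
--     t = text.lower()
--     best = 3
--     for i in range(len(t)):
--         for kw, rank in _KEYWORD_RANK.items():
--             if rank < best and t.startswith(kw, i):
--                 best = rank
--     return _LABELS[best]
-- ===== Notes on version B (the rewrite author's own statement) =====
-- stated objective: alternative
-- what changed: Replaced the cascade of whole-text substring-membership tests per priority class by a single positional scan that, at every index, keeps the minimum rank of any keyword starting there (keyword->rank table), returning the label of the best rank found.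
import Mathlib
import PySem

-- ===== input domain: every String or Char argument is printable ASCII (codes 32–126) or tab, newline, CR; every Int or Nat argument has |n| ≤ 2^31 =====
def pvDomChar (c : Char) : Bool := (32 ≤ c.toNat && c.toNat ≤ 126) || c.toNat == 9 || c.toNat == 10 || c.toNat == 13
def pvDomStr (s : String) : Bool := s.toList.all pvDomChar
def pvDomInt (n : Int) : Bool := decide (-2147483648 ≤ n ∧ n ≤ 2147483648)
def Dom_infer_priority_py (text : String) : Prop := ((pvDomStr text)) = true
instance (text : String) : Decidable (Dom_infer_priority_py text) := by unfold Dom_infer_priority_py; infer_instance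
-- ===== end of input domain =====

-- B replaces A's keyword-membership cascade by a single positional scan that keeps the
-- best (lowest) matching rank at every index (alternative algorithm, same cost class).


-- ===== PORT A =====
def infer_priority_py (text : String) : String :=
  let text_lower := PySem.Str.lower text
  if ["critical", "essential", "must-read", "fundamental"].any (fun word => PySem.Str.isIn word text_lower) then
    "critical"
  else if ["important", "high", "recommended"].any (fun word => PySem.Str.isIn word text_lower) then
    "high"
  else if ["useful", "helpful", "medium"].any (fun word => PySem.Str.isIn word text_lower) then
    "medium"
  else
    "low"

-- ===== PORT B =====
-- the Python dict _KEYWORD_RANK as an insertion-ordered association list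
def pvKeywordRank : List (String × Nat) :=
  [("critical", 0), ("essential", 0), ("must-read", 0), ("fundamental", 0),
   ("important", 1), ("high", 1), ("recommended", 1),
   ("useful", 2), ("helpful", 2), ("medium", 2)]

def pvLabels : List String := ["critical", "high", "medium", "low"]

-- t.startswith(kw, i) with 0 ≤ i is ported exactly as Chars.startswith on (t.drop i)
def infer_priority_py_alt (text : String) : String :=
  let t := (PySem.Str.lower text).toList
  let best :=
    (PySem.List.pyRange 0 (t.length : Int) 1).foldl
      (fun best i =>
        pvKeywordRank.foldl
          (fun best p =>
            if p.2 < best ∧ PySem.Chars.startswith (t.drop i.toNat) p.1.toList = true then p.2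
            else best)
          best)
      3
  pvLabels.getD best "low"

-- ===== PRECONDITION & SPEC =====
def Spec_infer_priority_py (text : String) (out : String) : Prop := out = infer_priority_py_alt text
instance (text : String) (out : String) : Decidable (Spec_infer_priority_py text out) := by unfold Spec_infer_priority_py; infer_instance

-- ===== CLAIM (what is proved, stated in full; the proofs are below) =====
def Claim_equal_infer_priority_py : Prop := ∀ (text : String), Dom_infer_priority_py text → Spec_infer_priority_py text (infer_priority_py text)

-- ===== LEMMAS AND PROOFS =====

-- does the keyword of entry p start at position i of t?
def pvC (t : List Char) (i : Nat) (p : String × Nat) : Bool :=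
  PySem.Chars.startswith (t.drop i) p.1.toList

-- min-form of B's inner update
def pvF (t : List Char) (i : Nat) : Nat → (String × Nat) → Nat :=
  fun b p => if pvC t i p then min b p.2 else b

-- the best rank found at position i starting from 3, and over the whole text
def pvOuter (t : List Char) : Nat :=
  (List.range t.length).foldl (fun b i => pvKeywordRank.foldl (pvF t i) b) 3

-- B's guarded update equals the min-form update
lemma foldl_if_eq_min (t : List Char) (i : Nat) (ps : List (String × Nat)) (best : Nat) :
    ps.foldl (fun b p => if p.2 < b ∧ pvC t i p = true then p.2 else b) best
      = ps.foldl (pvF t i) best := by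
  have h : (fun (b : Nat) (p : String × Nat) => if p.2 < b ∧ pvC t i p = true then p.2 else b)
      = pvF t i := by
    funext b p
    unfold pvF
    split_ifs with h1 h2 <;> simp_all <;> omega
  rw [h]

lemma minfold_le_init (t : List Char) (i : Nat) (ps : List (String × Nat)) (best : Nat) :
    ps.foldl (pvF t i) best ≤ best := by
  induction ps generalizing best with
  | nil => simp
  | cons q qs ih =>
      simp only [List.foldl_cons]
      refine le_trans (ih _) ?_
      unfold pvF; split_ifs <;> omega

lemma minfold_le_mem (t : List Char) (i : Nat) (ps : List (String × Nat)) (best : Nat)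
    (p : String × Nat) (hp : p ∈ ps) (hc : pvC t i p = true) :
    ps.foldl (pvF t i) best ≤ p.2 := by
  induction ps generalizing best with
  | nil => cases hp
  | cons q qs ih =>
      simp only [List.foldl_cons]
      rcases List.mem_cons.mp hp with h | h
      · subst h
        refine le_trans (minfold_le_init t i qs _) ?_
        unfold pvF; rw [if_pos hc]; omega
      · exact ih _ h

lemma minfold_cases (t : List Char) (i : Nat) (ps : List (String × Nat)) (best : Nat) :
    ps.foldl (pvF t i) best = best ∨
      ∃ p ∈ ps, pvC t i p = true ∧ ps.foldl (pvF t i) best = p.2 := by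
  induction ps generalizing best with
  | nil => left; rfl
  | cons q qs ih =>
      simp only [List.foldl_cons]
      rcases ih (pvF t i best q) with h | ⟨p, hp, hc, he⟩
      · rw [h]
        unfold pvF
        split_ifs with hq
        · rcases Nat.le_total best q.2 with hbq | hbq
          · left; exact Nat.min_eq_left hbq
          · right; exact ⟨q, List.mem_cons_self, hq, Nat.min_eq_right hbq⟩
        · left; rfl
      · right; exact ⟨p, List.mem_cons_of_mem _ hp, hc, he⟩

lemma outerfold_le_init (t : List Char) (l : List Nat) (b : Nat) :
    l.foldl (fun b i => pvKeywordRank.foldl (pvF t i) b) b ≤ b := by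
  induction l generalizing b with
  | nil => simp
  | cons j js ih =>
      simp only [List.foldl_cons]
      exact le_trans (ih _) (minfold_le_init t j _ _)

lemma outer_le (t : List Char) (i : Nat) (hi : i < t.length)
    (p : String × Nat) (hp : p ∈ pvKeywordRank) (hc : pvC t i p = true) :
    pvOuter t ≤ p.2 := by
  unfold pvOuter
  have : ∀ (l : List Nat) (b : Nat), i ∈ l →
      l.foldl (fun b i => pvKeywordRank.foldl (pvF t i) b) b ≤ p.2 := by
    intro l
    induction l with
    | nil => intro b h; cases h
    | cons j js ih =>
        intro b hmem
        simp only [List.foldl_cons]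
        rcases List.mem_cons.mp hmem with h | h
        · subst h
          exact le_trans (outerfold_le_init t js _) (minfold_le_mem t i pvKeywordRank b p hp hc)
        · exact ih _ h
  exact this _ 3 (List.mem_range.mpr hi)

lemma outer_cases (t : List Char) :
    pvOuter t = 3 ∨
      ∃ i < t.length, ∃ p ∈ pvKeywordRank, pvC t i p = true ∧ pvOuter t = p.2 := by
  unfold pvOuter
  have : ∀ (l : List Nat) (b : Nat), (∀ j ∈ l, j < t.length) →
      l.foldl (fun b i => pvKeywordRank.foldl (pvF t i) b) b = b ∨
        ∃ i < t.length, ∃ p ∈ pvKeywordRank, pvC t i p = true ∧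
          l.foldl (fun b i => pvKeywordRank.foldl (pvF t i) b) b = p.2 := by
    intro l
    induction l with
    | nil => intro b _; left; rfl
    | cons j js ih =>
        intro b hl
        simp only [List.foldl_cons]
        rcases ih (pvKeywordRank.foldl (pvF t j) b) (fun k hk => hl k (List.mem_cons_of_mem _ hk))
          with h | ⟨i, hi, p, hp, hc, he⟩
        · rw [h]
          rcases minfold_cases t j pvKeywordRank b with h2 | ⟨p, hp, hc, he⟩
          · left; exact h2
          · right; exact ⟨j, hl j List.mem_cons_self, p, hp, hc, he⟩
        · right; exact ⟨i, hi, p, hp, hc, he⟩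
  rcases this (List.range t.length) 3 (fun j hj => List.mem_range.mp hj) with h | h
  · left; exact h
  · right; exact h

-- 'sub in t' for a nonempty keyword is exactly 'sub starts at some position i < len t'
lemma isIn_iff_exists_lt (w t : List Char) (hw : w ≠ []) :
    PySem.Chars.isIn w t = true ↔
      ∃ i < t.length, PySem.Chars.startswith (t.drop i) w = true := by
  rw [← PySem.Chars.exists_prefix_drop_iff_isIn]
  constructor
  · rintro ⟨j, hj⟩
    by_cases h : j < t.length
    · exact ⟨j, h, (PySem.Chars.startswith_iff _ _).mpr hj⟩
    · exfalso
      rw [List.drop_eq_nil_of_le (le_of_not_gt h)] at hj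
      exact hw (List.prefix_nil.mp hj)
  · rintro ⟨i, _, hi⟩
    exact ⟨i, (PySem.Chars.startswith_iff _ _).mp hi⟩

-- B's port computes pvLabels[pvOuter t]
lemma alt_eq (text : String) :
    infer_priority_py_alt text
      = pvLabels.getD (pvOuter ((PySem.Str.lower text).toList)) "low" := by
  unfold infer_priority_py_alt pvOuter
  simp only [PySem.List.pyRange_one, List.foldl_map, Int.sub_zero, Int.toNat_natCast, zero_add]
  congr 2
  funext b i
  exact foldl_if_eq_min _ i _ b

-- the three A-side conditions, on the list side
def pvHit (t : List Char) (w : String) : Prop := PySem.Chars.isIn w.toList t = true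

def pvC0 (t : List Char) : Prop :=
  pvHit t "critical" ∨ pvHit t "essential" ∨ pvHit t "must-read" ∨ pvHit t "fundamental"
def pvC1 (t : List Char) : Prop :=
  pvHit t "important" ∨ pvHit t "high" ∨ pvHit t "recommended"
def pvC2 (t : List Char) : Prop :=
  pvHit t "useful" ∨ pvHit t "helpful" ∨ pvHit t "medium"

lemma hit_of_match (t : List Char) (i : Nat) (hi : i < t.length)
    (p : String × Nat) (hp : p ∈ pvKeywordRank) (hc : pvC t i p = true) :
    pvHit t p.1 := by
  unfold pvHit
  have hw : p.1.toList ≠ [] := by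
    simp only [pvKeywordRank, List.mem_cons, List.not_mem_nil, or_false] at hp
    rcases hp with h|h|h|h|h|h|h|h|h|h <;> rw [h] <;> decide
  exact (isIn_iff_exists_lt _ t hw).mpr ⟨i, hi, hc⟩

lemma match_of_hit (t : List Char) (p : String × Nat) (hp : p ∈ pvKeywordRank)
    (h : pvHit t p.1) : pvOuter t ≤ p.2 := by
  unfold pvHit at h
  have hw : p.1.toList ≠ [] := by
    simp only [pvKeywordRank, List.mem_cons, List.not_mem_nil, or_false] at hp
    rcases hp with h'|h'|h'|h'|h'|h'|h'|h'|h'|h' <;> rw [h'] <;> decide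
  rcases (isIn_iff_exists_lt _ t hw).mp h with ⟨i, hi, hc⟩
  exact outer_le t i hi p hp hc

-- soundness: a non-default result witnesses a keyword hit of exactly its rank
lemma outer_sound (t : List Char) :
    pvOuter t = 3 ∨ (pvOuter t = 0 ∧ pvC0 t) ∨ (pvOuter t = 1 ∧ pvC1 t) ∨
      (pvOuter t = 2 ∧ pvC2 t) := by
  rcases outer_cases t with h | ⟨i, hi, p, hp, hc, he⟩
  · left; exact h
  · have hhit := hit_of_match t i hi p hp hc
    right
    simp only [pvKeywordRank, List.mem_cons, List.not_mem_nil, or_false] at hp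
    rcases hp with h|h|h|h|h|h|h|h|h|h <;> rw [h] at hhit he
    · exact Or.inl ⟨he, Or.inl hhit⟩
    · exact Or.inl ⟨he, Or.inr (Or.inl hhit)⟩
    · exact Or.inl ⟨he, Or.inr (Or.inr (Or.inl hhit))⟩
    · exact Or.inl ⟨he, Or.inr (Or.inr (Or.inr hhit))⟩
    · exact Or.inr (Or.inl ⟨he, Or.inl hhit⟩)
    · exact Or.inr (Or.inl ⟨he, Or.inr (Or.inl hhit)⟩)
    · exact Or.inr (Or.inl ⟨he, Or.inr (Or.inr hhit)⟩)
    · exact Or.inr (Or.inr ⟨he, Or.inl hhit⟩)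
    · exact Or.inr (Or.inr ⟨he, Or.inr (Or.inl hhit)⟩)
    · exact Or.inr (Or.inr ⟨he, Or.inr (Or.inr hhit)⟩)

lemma outer_le0 (t : List Char) (h : pvC0 t) : pvOuter t = 0 := by
  have : pvOuter t ≤ 0 := by
    rcases h with h|h|h|h
    · exact match_of_hit t ("critical", 0) (by simp [pvKeywordRank]) h
    · exact match_of_hit t ("essential", 0) (by simp [pvKeywordRank]) h
    · exact match_of_hit t ("must-read", 0) (by simp [pvKeywordRank]) h
    · exact match_of_hit t ("fundamental", 0) (by simp [pvKeywordRank]) h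
  omega

lemma outer_le1 (t : List Char) (h : pvC1 t) : pvOuter t ≤ 1 := by
  rcases h with h|h|h
  · exact match_of_hit t ("important", 1) (by simp [pvKeywordRank]) h
  · exact match_of_hit t ("high", 1) (by simp [pvKeywordRank]) h
  · exact match_of_hit t ("recommended", 1) (by simp [pvKeywordRank]) h

lemma outer_le2 (t : List Char) (h : pvC2 t) : pvOuter t ≤ 2 := by
  rcases h with h|h|h
  · exact match_of_hit t ("useful", 2) (by simp [pvKeywordRank]) h
  · exact match_of_hit t ("helpful", 2) (by simp [pvKeywordRank]) h
  · exact match_of_hit t ("medium", 2) (by simp [pvKeywordRank]) h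


lemma pvC0_iff (t : List Char) : pvC0 t ↔
    (PySem.Chars.isIn "critical".toList t = true ∨
      PySem.Chars.isIn "essential".toList t = true ∨
        PySem.Chars.isIn "must-read".toList t = true ∨
          PySem.Chars.isIn "fundamental".toList t = true) := Iff.rfl

lemma pvC1_iff (t : List Char) : pvC1 t ↔
    (PySem.Chars.isIn "important".toList t = true ∨
      PySem.Chars.isIn "high".toList t = true ∨
        PySem.Chars.isIn "recommended".toList t = true) := Iff.rfl

lemma pvC2_iff (t : List Char) : pvC2 t ↔
    (PySem.Chars.isIn "useful".toList t = true ∨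
      PySem.Chars.isIn "helpful".toList t = true ∨
        PySem.Chars.isIn "medium".toList t = true) := Iff.rfl

-- ===== VERDICT (by name: the statement is the Claim_ definition above) =====
set_option maxHeartbeats 1000000 in
theorem infer_priority_py_spec : Claim_equal_infer_priority_py := by
  intro text _
  unfold Spec_infer_priority_py
  rw [alt_eq]
  simp only [infer_priority_py]
  set t := (PySem.Str.lower text).toList with ht
  have h0iff : ((["critical", "essential", "must-read", "fundamental"] : List String).any
      (fun word => PySem.Str.isIn word (PySem.Str.lower text)) = true) ↔ pvC0 t := by
    simp only [List.any_cons, List.any_nil, Bool.or_eq_true, Bool.false_eq_true, or_false,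
      PySem.Str.isIn_eq, ← ht]
    exact (pvC0_iff t).symm
  have h1iff : ((["important", "high", "recommended"] : List String).any
      (fun word => PySem.Str.isIn word (PySem.Str.lower text)) = true) ↔ pvC1 t := by
    simp only [List.any_cons, List.any_nil, Bool.or_eq_true, Bool.false_eq_true, or_false,
      PySem.Str.isIn_eq, ← ht]
    exact (pvC1_iff t).symm
  have h2iff : ((["useful", "helpful", "medium"] : List String).any
      (fun word => PySem.Str.isIn word (PySem.Str.lower text)) = true) ↔ pvC2 t := by
    simp only [List.any_cons, List.any_nil, Bool.or_eq_true, Bool.false_eq_true, or_false,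
      PySem.Str.isIn_eq, ← ht]
    exact (pvC2_iff t).symm
  by_cases h0 : pvC0 t
  · rw [if_pos (h0iff.mpr h0), outer_le0 t h0]; rfl
  · rw [if_neg (fun h => h0 (h0iff.mp h))]
    by_cases h1 : pvC1 t
    · rw [if_pos (h1iff.mpr h1)]
      have hle := outer_le1 t h1
      rcases outer_sound t with h | ⟨he, _⟩ | ⟨he, _⟩ | ⟨he, _⟩
      · omega
      · exact absurd ‹pvC0 t› h0
      · rw [he]; rfl
      · omega
    · rw [if_neg (fun h => h1 (h1iff.mp h))]
      by_cases h2 : pvC2 t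
      · rw [if_pos (h2iff.mpr h2)]
        have hle := outer_le2 t h2
        rcases outer_sound t with h | ⟨he, _⟩ | ⟨he, _⟩ | ⟨he, _⟩
        · omega
        · exact absurd ‹pvC0 t› h0
        · exact absurd ‹pvC1 t› h1
        · rw [he]; rfl
      · rw [if_neg (fun h => h2 (h2iff.mp h))]
        rcases outer_sound t with h | ⟨he, _⟩ | ⟨he, _⟩ | ⟨he, _⟩
        · rw [h]; rfl
        · exact absurd ‹pvC0 t› h0
        · exact absurd ‹pvC1 t› h1
        · exact absurd ‹pvC2 t› h2
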